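-- pv_equiv track=rewrite | github.com/Lab00700/Algorithm | 프로그래머스/2/87390. n＾2 배열 자르기/n＾2 배열 자르기.py | solution
-- ===== SOURCE A (Python) =====
-- def solution(n, left, right):
--     answer = []
--     i=left
--     while i<=right:
--         i1=int(i/n)+1
--         i2=i%n+1
--         answer.append(i1 if i1>i2 else i2)
--         i+=1
--     return answer
-- ===== SOURCE B (Python) =====
-- def solution(n, left, right):
--     r0, c0 = divmod(left, n)
--     r1, c1 = divmod(right, n)
--     out = []
--     for r in range(r0, r1 + 1):
--         lo = c0 if r == r0 else 0
--         hi = c1 + 1 if r == r1 else n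
--         out.extend([r + 1] * (min(r + 1, hi) - lo))   # columns c in [lo, hi) with c <= r
--         out.extend(range(max(lo, r + 1) + 1, hi + 1)) # columns c in [lo, hi) with c > r
--     return out
-- ===== Notes on version B (the rewrite author's own statement) =====
-- stated objective: alternative
-- what changed: B replaces A's per-index while-loop (one divmod and one append per element) with a row-by-row construction of the n x n max-index grid: first/last rows are located by one divmod of left and right, and each row is emitted as one constant block [r+1]*k plus one range(), clipped to the column window.
-- outside the precondition, e.g. on solution(-2, 0, 1): A returns [1, 1], B returns []; on solution(0, 5, 3): A returns [], B raises ZeroDivisionError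
import Mathlib
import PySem

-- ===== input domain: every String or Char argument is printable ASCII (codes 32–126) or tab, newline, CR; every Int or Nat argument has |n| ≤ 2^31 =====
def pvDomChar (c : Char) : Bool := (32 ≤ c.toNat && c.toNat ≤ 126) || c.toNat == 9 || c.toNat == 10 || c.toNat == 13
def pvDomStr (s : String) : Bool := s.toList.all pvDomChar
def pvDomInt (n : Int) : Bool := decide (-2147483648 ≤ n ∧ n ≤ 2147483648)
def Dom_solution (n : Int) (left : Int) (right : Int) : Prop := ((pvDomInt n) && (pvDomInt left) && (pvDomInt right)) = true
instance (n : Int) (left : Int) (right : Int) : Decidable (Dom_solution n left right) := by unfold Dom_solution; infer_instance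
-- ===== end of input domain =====

-- B computes the answer row by row of the n×n grid (a constant block plus a range per row)
-- instead of A's per-index loop; equivalence is proved for grid sizes 1 ≤ n (the natural domain).

-- ===== PORT A =====
-- while i <= right: append(max-ish of int(i/n)+1 and i%n+1); i += 1
-- int(i/n) is float-truncating division: PySem.Int.truncdiv, exact on Dom (|i|,|n| ≤ 2^31 < 2^53)
def solutionLoop (n : Int) (right : Int) (i : Int) (answer : List Int) : List Int :=
  if _h : i ≤ right then
    let i1 := PySem.Int.truncdiv i n + 1
    let i2 := PySem.Int.mod i n + 1
    solutionLoop n right (i + 1) (answer ++ [if i1 > i2 then i1 else i2])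
  else answer
termination_by (right + 1 - i).toNat
decreasing_by omega

def solution (n : Int) (left : Int) (right : Int) : List Int :=
  solutionLoop n right left []

-- ===== PORT B =====
def solution_alt (n : Int) (left : Int) (right : Int) : List Int :=
  let r0 := PySem.Int.floordiv left n
  let c0 := PySem.Int.mod left n
  let r1 := PySem.Int.floordiv right n
  let c1 := PySem.Int.mod right n
  (PySem.List.pyRange r0 (r1 + 1)).foldl
    (fun out r =>
      out ++ PySem.List.pyRepeat [r + 1]
              (min (r + 1) (if r = r1 then c1 + 1 else n) - (if r = r0 then c0 else 0))
          ++ PySem.List.pyRange (max (if r = r0 then c0 else 0) (r + 1) + 1)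
              ((if r = r1 then c1 + 1 else n) + 1)) []

-- ===== PRECONDITION & SPEC =====
-- Pre_ restricts to the natural domain of the task (n is the side of an n×n grid): for n ≤ 0
-- the grid is meaningless — A raises ZeroDivisionError whenever left ≤ right and n = 0, and for
-- negative n A's values are accidental; B raises ZeroDivisionError at n = 0 and returns [] for n < 0.
def Pre_solution (n : Int) (left : Int) (right : Int) : Prop := 1 ≤ n
instance (n : Int) (left : Int) (right : Int) : Decidable (Pre_solution n left right) := by unfold Pre_solution; infer_instance
def pvWitness_solution : Int × Int × Int := (3, 2, 5)

def Spec_solution (n : Int) (left : Int) (right : Int) (out : List Int) : Prop := out = solution_alt n left right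
instance (n : Int) (left : Int) (right : Int) (out : List Int) : Decidable (Spec_solution n left right out) := by unfold Spec_solution; infer_instance

-- ===== CLAIM (what is proved, stated in full; the proofs are below) =====
def Claim_equal_solution : Prop := ∀ (n : Int) (left : Int) (right : Int), Dom_solution n left right → Pre_solution n left right → Spec_solution n left right (solution n left right)

-- ===== LEMMAS AND PROOFS =====

-- the value A appends for index i
def fA (n i : Int) : Int :=
  if PySem.Int.truncdiv i n + 1 > PySem.Int.mod i n + 1
  then PySem.Int.truncdiv i n + 1 else PySem.Int.mod i n + 1

theorem loopA (n right i : Int) (acc : List Int) :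
    solutionLoop n right i acc = acc ++ (PySem.List.pyRange i (right + 1)).map (fA n) := by
  rw [solutionLoop]
  split
  · rw [loopA n right (i + 1)]
    rw [PySem.List.pyRange_one_cons (a := i) (b := right + 1) (by omega)]
    simp [fA]
  · rw [PySem.List.pyRange_one_eq_nil (by omega)]
    simp
termination_by (right + 1 - i).toNat
decreasing_by omega

theorem fA_eq (n i : Int) (hn : 1 ≤ n) :
    fA n i = max (PySem.Int.floordiv i n) (PySem.Int.mod i n) + 1 := by
  unfold fA
  by_cases hi : 0 ≤ i
  · rw [show PySem.Int.truncdiv i n = PySem.Int.floordiv i n from by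
      rw [PySem.Int.floordiv_eq_ediv_of_pos (by omega), show PySem.Int.truncdiv = Int.tdiv from rfl,
        Int.tdiv_eq_ediv_of_nonneg hi]]
    split_ifs <;> omega
  · have hediv : i / n < 0 := Int.ediv_neg_of_neg_of_pos (by omega) (by omega)
    have h2 : PySem.Int.floordiv i n < 0 := by
      rw [PySem.Int.floordiv_eq_ediv_of_pos (by omega)]; exact hediv
    have h1 : PySem.Int.truncdiv i n ≤ 0 := by
      have hs : n.sign = 1 := Int.sign_eq_one_of_pos (by omega)
      rw [show PySem.Int.truncdiv = Int.tdiv from rfl, Int.tdiv_eq_ediv, hs]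
      split_ifs <;> omega
    have h3 : 0 ≤ PySem.Int.mod i n := PySem.Int.mod_nonneg _ (by omega)
    split_ifs <;> omega

theorem pyRange_shift (s a b : Int) :
    PySem.List.pyRange (s + a) (s + b) = (PySem.List.pyRange a b).map (fun c => s + c) := by
  rw [PySem.List.pyRange_one, PySem.List.pyRange_one, List.map_map]
  rw [show s + b - (s + a) = b - a from by ring]
  congr 1
  funext k
  simp [Function.comp]
  ring

theorem map_const_pyRange (a b v : Int) :
    (PySem.List.pyRange a b).map (fun _ => v) = List.replicate (b - a).toNat v := by
  rw [PySem.List.pyRange_one, List.map_map]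
  simp [Function.comp_def, List.map_const']

-- one clipped row of B equals the column-wise values max(r+1, c+1) for c in [lo, hi)
theorem chunk_eq (r lo hi : Int) :
    PySem.List.pyRepeat [r + 1] (min (r + 1) hi - lo)
      ++ PySem.List.pyRange (max lo (r + 1) + 1) (hi + 1)
    = (PySem.List.pyRange lo hi).map (fun c => max (r + 1) (c + 1)) := by
  rw [PySem.List.pyRepeat_singleton]
  by_cases hA : hi ≤ lo
  · rw [show (min (r + 1) hi - lo).toNat = 0 from by omega, PySem.List.pyRange_one_eq_nil hA,
      PySem.List.pyRange_one_eq_nil (show hi + 1 ≤ max lo (r + 1) + 1 from by omega)]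
    simp
  · by_cases hB : hi ≤ r + 1
    · -- every column c < hi ≤ r+1 is ≤ r: constant block only
      rw [PySem.List.pyRange_one_eq_nil (show hi + 1 ≤ max lo (r + 1) + 1 from by omega)]
      rw [List.map_congr_left (g := fun _ => r + 1)
        (by intro c hc; rw [PySem.List.mem_pyRange_one] at hc; beta_reduce; omega)]
      rw [map_const_pyRange, show (min (r + 1) hi - lo).toNat = (hi - lo).toNat from by omega]
      simp
    · by_cases hC : lo ≤ r + 1
      · -- split the columns at r+1
        rw [PySem.List.pyRange_one_append lo (r + 1) hi hC (by omega), List.map_append]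
        rw [List.map_congr_left (g := fun _ => r + 1) (l := PySem.List.pyRange lo (r + 1))
          (by intro c hc; rw [PySem.List.mem_pyRange_one] at hc; beta_reduce; omega)]
        rw [map_const_pyRange]
        rw [List.map_congr_left (g := fun c => c + 1) (l := PySem.List.pyRange (r + 1) hi)
          (by intro c hc; rw [PySem.List.mem_pyRange_one] at hc; beta_reduce; omega)]
        rw [show (fun c : Int => c + 1) = (fun c : Int => 1 + c) from by funext c; ring,
          ← pyRange_shift 1 (r + 1) hi]
        rw [show max lo (r + 1) = r + 1 from by omega]
        rw [show (1 : Int) + (r + 1) = r + 1 + 1 from by ring, show (1 : Int) + hi = hi + 1 from by ring]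
        rw [show (min (r + 1) hi - lo).toNat = (r + 1 - lo).toNat from by omega]
      · -- every column c ≥ lo > r+1 is > r: range part only
        rw [show (min (r + 1) hi - lo).toNat = 0 from by omega]
        rw [List.map_congr_left (g := fun c => c + 1)
          (by intro c hc; rw [PySem.List.mem_pyRange_one] at hc; beta_reduce; omega)]
        rw [show (fun c : Int => c + 1) = (fun c : Int => 1 + c) from by funext c; ring,
          ← pyRange_shift 1 lo hi]
        rw [show max lo (r + 1) = lo from by omega]
        rw [show (1 : Int) + lo = lo + 1 from by ring, show (1 : Int) + hi = hi + 1 from by ring]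
        simp

theorem rowval (n r c : Int) (hn : 1 ≤ n) (hc0 : 0 ≤ c) (hcn : c < n) :
    PySem.Int.floordiv (n * r + c) n = r ∧ PySem.Int.mod (n * r + c) n = c := by
  have h1 : PySem.Int.floordiv (n * r + c) n = r := by
    rw [PySem.Int.floordiv_eq_iff_of_pos (by omega)]
    constructor <;> nlinarith
  refine ⟨h1, ?_⟩
  have h2 := PySem.Int.floordiv_mul_add_mod (n * r + c) n
  rw [h1] at h2
  nlinarith

-- one clipped row, shifted to index space: row r covers indices n*r+lo … n*r+hi-1
theorem chunk_fA (n r lo hi : Int) (hn : 1 ≤ n) (hlo : 0 ≤ lo) (hhi : hi ≤ n) :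
    PySem.List.pyRepeat [r + 1] (min (r + 1) hi - lo)
      ++ PySem.List.pyRange (max lo (r + 1) + 1) (hi + 1)
    = (PySem.List.pyRange (n * r + lo) (n * r + hi)).map (fA n) := by
  rw [chunk_eq, pyRange_shift (n * r) lo hi, List.map_map]
  apply List.map_congr_left
  intro c hc
  rw [PySem.List.mem_pyRange_one] at hc
  obtain ⟨hf, hm⟩ := rowval n r c hn (by omega) (by omega)
  simp only [Function.comp_apply]
  rw [fA_eq n _ hn, hf, hm]
  omega

-- the fold over rows a, a+1, …, r1 produces A's values for indices from
-- (left, if a is the first row; n*a otherwise) up to right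
theorem foldB (n left right : Int) (hn : 1 ≤ n) (a : Int) (acc : List Int)
    (ha : PySem.Int.floordiv left n ≤ a) :
    (PySem.List.pyRange a (PySem.Int.floordiv right n + 1)).foldl
      (fun out r =>
        out ++ PySem.List.pyRepeat [r + 1]
                (min (r + 1) (if r = PySem.Int.floordiv right n then PySem.Int.mod right n + 1 else n)
                  - (if r = PySem.Int.floordiv left n then PySem.Int.mod left n else 0))
            ++ PySem.List.pyRange
                (max (if r = PySem.Int.floordiv left n then PySem.Int.mod left n else 0) (r + 1) + 1)
                ((if r = PySem.Int.floordiv right n then PySem.Int.mod right n + 1 else n) + 1)) acc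
    = acc ++ (PySem.List.pyRange (if a = PySem.Int.floordiv left n then left else n * a) (right + 1)).map (fA n) := by
  have hc0l : 0 ≤ PySem.Int.mod left n := PySem.Int.mod_nonneg _ (by omega)
  have hc0u : PySem.Int.mod left n < n := PySem.Int.mod_lt _ (by omega)
  have hc1l : 0 ≤ PySem.Int.mod right n := PySem.Int.mod_nonneg _ (by omega)
  have hc1u : PySem.Int.mod right n < n := PySem.Int.mod_lt _ (by omega)
  have hleft := PySem.Int.floordiv_mul_add_mod left n
  have hright := PySem.Int.floordiv_mul_add_mod right n
  have hmc0 := mul_comm n (PySem.Int.floordiv left n)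
  have hmc1 := mul_comm n (PySem.Int.floordiv right n)
  by_cases hend : PySem.Int.floordiv right n + 1 ≤ a
  · rw [PySem.List.pyRange_one_eq_nil hend, List.foldl_nil,
      PySem.List.pyRange_one_eq_nil (by
        split_ifs with h
        · nlinarith [mul_nonneg
            (show (0:Int) ≤ PySem.Int.floordiv left n - (PySem.Int.floordiv right n + 1) from by omega)
            (show (0:Int) ≤ n from by omega)]
        · nlinarith [mul_nonneg
            (show (0:Int) ≤ a - (PySem.Int.floordiv right n + 1) from by omega)
            (show (0:Int) ≤ n from by omega)])]
    simp
  · push Not at hend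
    rw [PySem.List.pyRange_one_cons hend, List.foldl_cons]
    rw [foldB n left right hn (a + 1) _ (by omega)]
    rw [if_neg (show ¬a + 1 = PySem.Int.floordiv left n from by omega)]
    rw [List.append_assoc acc,
      chunk_fA n a _ _ hn (by split_ifs <;> omega) (by split_ifs <;> omega)]
    have hstart : n * a + (if a = PySem.Int.floordiv left n then PySem.Int.mod left n else 0)
        = (if a = PySem.Int.floordiv left n then left else n * a) := by
      split_ifs with h
      · rw [h]; linarith [hleft, hmc0]
      · ring
    by_cases ha1 : a = PySem.Int.floordiv right n
    · -- last row: it ends exactly at index right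
      have h1 : right + 1 ≤ n * (a + 1) := by
        rw [ha1]; nlinarith [hright, hc1u, hmc1]
      have h2 : n * a + (PySem.Int.mod right n + 1) = right + 1 := by
        rw [ha1]; linarith [hright, hmc1]
      rw [if_pos ha1, PySem.List.pyRange_one_eq_nil h1, h2, hstart]
      simp
    · -- full middle row: it ends at index n*(a+1)-1 and the rest continues there
      have h1 : (if a = PySem.Int.floordiv left n then left else n * a) ≤ n * (a + 1) := by
        split_ifs with h
        · rw [h]; nlinarith [hleft, hc0u, hmc0]
        · nlinarith
      have h2 : n * (a + 1) ≤ right + 1 := by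
        nlinarith [hright, hc1l, hmc1, mul_nonneg
          (show (0:Int) ≤ PySem.Int.floordiv right n - (a + 1) from by omega)
          (show (0:Int) ≤ n from by omega)]
      rw [if_neg ha1, show n * a + n = n * (a + 1) from by ring, hstart]
      rw [PySem.List.pyRange_one_append _ (n * (a + 1)) (right + 1) h1 h2, List.map_append]
      simp
termination_by (PySem.Int.floordiv right n + 1 - a).toNat
decreasing_by omega

-- ===== VERDICT (by name: the statement is the Claim_ definition above) =====
theorem solution_spec : Claim_equal_solution := by
  intro n left right _hdom hpre
  unfold Spec_solution solution solution_alt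
  have hn : 1 ≤ n := hpre
  rw [loopA, foldB n left right hn _ [] le_rfl, if_pos rfl]
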